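-- pv_equiv track=rewrite | github.com/asshat1981ar/aura-cli | memory/brain.py | compress_to_budget
-- ===== SOURCE A (Python) =====
-- from typing import List, Optional, Any
--
-- def compress_to_budget(entries: List[str], max_tokens: int) -> List[str]:
--     """Return a subset of entries that fits within max_tokens (4 chars ≈ 1 token).
--
--     Keeps the most recent entries (tail of the list) first and discards
--     older ones until the budget is satisfied.
--     """
--     max_chars = max_tokens * 4
--     result: List[str] = []
--     used = 0
--     for entry in reversed(entries):
--         cost = len(entry) + 1  # +1 for separator
--         if used + cost > max_chars:
--             break
--         result.append(entry)
--         used += cost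
--     result.reverse()
--     return result
-- ===== SOURCE B (Python) =====
-- from typing import List
--
-- def compress_to_budget(entries: List[str], max_tokens: int) -> List[str]:
--     """Return a subset of entries that fits within max_tokens (4 chars ~ 1 token).
--
--     Cumulative-cost table over the reversed list + binary search for the cutoff,
--     then one slice of the tail.
--     """
--     # suffix cumulative costs: cum[i] = total cost of the last i+1 entries
--     cum: List[int] = []
--     s = 0
--     for e in reversed(entries):
--         s += len(e) + 1
--         cum.append(s)
--     budget = max_tokens * 4
--     # bisect_right(cum, budget) by hand (cum is strictly increasing)
--     lo, hi = 0, len(cum)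
--     while lo < hi:
--         mid = (lo + hi) // 2
--         if cum[mid] <= budget:
--             lo = mid + 1
--         else:
--             hi = mid
--     return entries[len(entries) - lo:]
-- ===== Notes on version B (the rewrite author's own statement) =====
-- stated objective: alternative
-- what changed: Replaces the accumulate-and-break loop with a precomputed table of suffix cumulative costs, a binary search (hand-rolled bisect_right) for the number k of tail entries that fit, and a single slice entries[len(entries)-k:].
import Mathlib
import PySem

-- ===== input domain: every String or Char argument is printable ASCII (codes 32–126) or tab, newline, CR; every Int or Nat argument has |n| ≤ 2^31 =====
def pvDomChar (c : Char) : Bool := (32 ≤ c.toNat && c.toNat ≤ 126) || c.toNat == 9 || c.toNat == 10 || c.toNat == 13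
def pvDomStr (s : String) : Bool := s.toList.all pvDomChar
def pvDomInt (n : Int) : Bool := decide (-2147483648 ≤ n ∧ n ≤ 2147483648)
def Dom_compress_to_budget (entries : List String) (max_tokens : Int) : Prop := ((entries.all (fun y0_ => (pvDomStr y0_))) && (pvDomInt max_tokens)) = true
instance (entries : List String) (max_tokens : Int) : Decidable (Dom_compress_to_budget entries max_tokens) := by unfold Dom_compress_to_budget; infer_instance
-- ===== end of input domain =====

-- B changes the decomposition (suffix cumulative-cost table + binary search + one slice),
-- not the result; A = B everywhere, return value only (neither mutates its arguments).

-- ===== PORT A =====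
-- A's for-loop over reversed(entries) with break: structural recursion over the
-- reversed list carrying 'used'; the break returns the accumulated result so far.
def compressLoopA (maxChars : Int) : List String → Int → List String
  | [], _ => []
  | e :: rest, used =>
    let cost : Int := (e.toList.length : Int) + 1
    if used + cost > maxChars then []
    else e :: compressLoopA maxChars rest (used + cost)

def compress_to_budget (entries : List String) (max_tokens : Int) : List String :=
  -- result is built in reversed-iteration order, then result.reverse() at the end
  (compressLoopA (max_tokens * 4) entries.reverse 0).reverse

-- ===== PORT B =====
-- the cum-building for-loop of Source B
def cumLoop : List String → Int → List Int
  | [], _ => []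
  | e :: rest, s =>
    let s' := s + ((e.toList.length : Int) + 1)
    s' :: cumLoop rest s'

-- the while lo < hi binary-search loop of Source B (cum[mid] is always in range: 0 ≤ mid < hi ≤ len)
def bsearch (cum : List Int) (budget : Int) (lo hi : Nat) : Nat :=
  if _h : lo < hi then
    let mid := (lo + hi) / 2
    if cum.getD mid 0 ≤ budget then bsearch cum budget (mid + 1) hi
    else bsearch cum budget lo mid
  else lo
termination_by hi - lo
decreasing_by all_goals omega

def compress_to_budget_alt (entries : List String) (max_tokens : Int) : List String :=
  let cum := cumLoop entries.reverse 0
  let budget := max_tokens * 4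
  let lo := bsearch cum budget 0 cum.length
  PySem.List.slice entries (some ((entries.length : Int) - (lo : Int))) none

-- ===== PRECONDITION & SPEC =====
def Spec_compress_to_budget (entries : List String) (max_tokens : Int) (out : List String) : Prop := out = compress_to_budget_alt entries max_tokens
instance (entries : List String) (max_tokens : Int) (out : List String) : Decidable (Spec_compress_to_budget entries max_tokens out) := by unfold Spec_compress_to_budget; infer_instance

-- ===== CLAIM (what is proved, stated in full; the proofs are below) =====
def Claim_equal_compress_to_budget : Prop := ∀ (entries : List String) (max_tokens : Int), Dom_compress_to_budget entries max_tokens → Spec_compress_to_budget entries max_tokens (compress_to_budget entries max_tokens)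

-- ===== LEMMAS AND PROOFS =====

-- greedy count: how many leading elements A's loop takes
def gcount (b : Int) : List String → Int → Nat
  | [], _ => 0
  | e :: rest, used =>
    let cost : Int := (e.toList.length : Int) + 1
    if used + cost > b then 0 else 1 + gcount b rest (used + cost)

theorem compressLoopA_eq_take (b : Int) (l : List String) (s : Int) :
    compressLoopA b l s = l.take (gcount b l s) := by
  induction l generalizing s with
  | nil => simp [compressLoopA, gcount]
  | cons e rest ih =>
    simp only [compressLoopA, gcount]
    split_ifs with h
    · simp
    · rw [ih, Nat.add_comm 1, List.take_succ_cons]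

theorem gcount_le_length (b : Int) (l : List String) (s : Int) :
    gcount b l s ≤ l.length := by
  induction l generalizing s with
  | nil => simp [gcount]
  | cons e rest ih =>
    simp only [gcount]
    split_ifs with h
    · simp
    · have := ih (s + ((e.toList.length : Int) + 1))
      simp only [List.length_cons]
      omega

theorem cumLoop_length (l : List String) (s : Int) : (cumLoop l s).length = l.length := by
  induction l generalizing s with
  | nil => rfl
  | cons e rest ih => simp [cumLoop, ih]

-- every entry of cumLoop l s is ≥ s + 1 (each cost is ≥ 1)
theorem cumLoop_ge (l : List String) (s : Int) (i : Nat) (hi : i < (cumLoop l s).length) :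
    s + 1 ≤ (cumLoop l s).getD i 0 := by
  induction l generalizing s i with
  | nil => simp [cumLoop] at hi
  | cons e rest ih =>
    cases i with
    | zero => simp [cumLoop]
    | succ j =>
      simp only [cumLoop, List.length_cons] at hi
      have := ih (s + ((e.toList.length : Int) + 1)) j (by omega)
      simp only [cumLoop, List.getD_cons_succ]
      have hc : (0:Int) ≤ (e.toList.length : Int) := Int.natCast_nonneg _
      omega

-- characterization of gcount against the cumulative table
theorem gcount_char (b : Int) (l : List String) (s : Int) :
    (∀ i, i < gcount b l s → (cumLoop l s).getD i 0 ≤ b) ∧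
    (∀ i, gcount b l s ≤ i → i < (cumLoop l s).length → b < (cumLoop l s).getD i 0) := by
  induction l generalizing s with
  | nil => simp [gcount, cumLoop]
  | cons e rest ih =>
    simp only [gcount, cumLoop]
    set s' := s + ((e.toList.length : Int) + 1) with hs'
    have hsc : s + ((e.toList.length : Int) + 1) = s' := rfl
    split_ifs with h
    · constructor
      · intro i hi; omega
      · intro i _ hi
        cases i with
        | zero => simpa using (by omega : b < s')
        | succ j =>
          simp only [List.length_cons] at hi
          have := cumLoop_ge rest s' j (by omega)
          simp only [List.getD_cons_succ]
          omega
    · obtain ⟨h1, h2⟩ := ih s'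
      constructor
      · intro i hi
        cases i with
        | zero => simpa using (by omega : s' ≤ b)
        | succ j =>
          simp only [List.getD_cons_succ]
          exact h1 j (by omega)
      · intro i hgi hi
        cases i with
        | zero => omega
        | succ j =>
          simp only [List.length_cons] at hi
          simp only [List.getD_cons_succ]
          exact h2 j (by omega) (by omega)

-- binary search finds the unique cutoff k
theorem bsearch_eq_aux (cum : List Int) (b : Int) (k : Nat)
    (hpre : ∀ i, i < k → cum.getD i 0 ≤ b)
    (hpost : ∀ i, k ≤ i → i < cum.length → b < cum.getD i 0) :
    ∀ n lo hi, hi - lo ≤ n → lo ≤ k → k ≤ hi → hi ≤ cum.length →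
      bsearch cum b lo hi = k := by
  intro n
  induction n with
  | zero =>
    intro lo hi hn h1 h2 h3
    rw [bsearch]
    have : ¬ lo < hi := by omega
    simp [this]; omega
  | succ m ih =>
    intro lo hi hn h1 h2 h3
    rw [bsearch]
    by_cases hlt : lo < hi
    · simp only [hlt, dif_pos]
      set mid := (lo + hi) / 2 with hmid
      have hmlo : lo ≤ mid := by omega
      have hmhi : mid < hi := by omega
      by_cases hle : cum.getD mid 0 ≤ b
      · have hmk : mid < k := by
          by_contra hc
          exact absurd hle (not_le.mpr (hpost mid (by omega) (by omega)))
        simp only [hle, if_pos]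
        exact ih (mid + 1) hi (by omega) (by omega) h2 h3
      · have hkm : k ≤ mid := by
          by_contra hc
          exact hle (hpre mid (by omega))
        simp only [hle, if_neg, not_false_iff]
        exact ih lo mid (by omega) h1 hkm (by omega)
    · simp [hlt]; omega


-- ===== VERDICT (by name: the statement is the Claim_ definition above) =====
theorem compress_to_budget_spec : Claim_equal_compress_to_budget := by
  intro entries max_tokens _
  unfold Spec_compress_to_budget compress_to_budget compress_to_budget_alt
  set b := max_tokens * 4 with hb
  set rev := entries.reverse with hrev
  set cum := cumLoop rev 0 with hcum
  set k := gcount b rev 0 with hk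
  have hklen : k ≤ rev.length := gcount_le_length b rev 0
  have hclen : cum.length = rev.length := cumLoop_length rev 0
  obtain ⟨hpre, hpost⟩ := gcount_char b rev 0
  have hbs : bsearch cum b 0 cum.length = k :=
    bsearch_eq_aux cum b k hpre hpost cum.length 0 cum.length (by omega)
      (by omega) (by omega) (by omega)
  have hlen : rev.length = entries.length := by simp [hrev]
  have hnonneg : (0:Int) ≤ (entries.length : Int) - (k : Int) := by
    have := hklen; omega
  show (compressLoopA b rev 0).reverse =
    PySem.List.slice entries (some ((entries.length : Int) - (bsearch cum b 0 cum.length : Int))) none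
  rw [compressLoopA_eq_take, hbs, PySem.List.slice_from _ hnonneg]
  have htoNat : ((entries.length : Int) - (k : Int)).toNat = entries.length - k := by omega
  rw [htoNat, ← hk, hrev, List.take_reverse, List.reverse_reverse]
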